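-- pv_equiv track=rewrite | github.com/sipa/asmap | remote_dumps/quagga_aggregate.py | find_common_suffixes
-- ===== SOURCE A (Python) =====
-- def dedup(asn_path):
--     i = len(asn_path) - 2
--     while i > 0:
--         if asn_path[i] == asn_path[i - 1]:
--             asn_path = asn_path[0:i] + asn_path[i+1:]
--         i -= 1
--     return asn_path
--
-- def find_common_suffixes(prefix_asn_paths):
--     common_asn_suffix = dict()
--     for prefix, asn_lists in prefix_asn_paths.items():
--         asn_lists = [dedup(asn_list.split(' ')) for asn_list in asn_lists] # preprocess
--         asn_lists = [asn_list for asn_list in asn_lists if asn_list != [] and set(asn_list) != ['']] # this very rarely happens in dumps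
--         asn_lists.sort(key = len)
--         cur_asn_suffix = asn_lists[0] # represents the common sub-path (from the end) of asns to a prefix
--         for asn_list in asn_lists[1:]:
--             if cur_asn_suffix == asn_list:
--                 continue
--             if cur_asn_suffix[-1] != asn_list[-1]: # multi-homed
--                 break
--             cur_asn_suffix_len = len(cur_asn_suffix)
--             for i in range(1, cur_asn_suffix_len): # position from the end
--                 if cur_asn_suffix[len(cur_asn_suffix) - i - 1] != asn_list[len(asn_list) - i - 1]:
--                     cur_asn_suffix = cur_asn_suffix[len(cur_asn_suffix) - i:]
--                     break
--         common_asn_suffix[prefix] = cur_asn_suffix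
--     return common_asn_suffix
-- ===== SOURCE B (Python) =====
-- def _dedup(toks):
--     # collapse consecutive duplicates among all but the last token, then keep the last token
--     out = []
--     for t in toks[:-1]:
--         if not out or out[-1] != t:
--             out.append(t)
--     out.append(toks[-1])
--     return out
--
-- def _common_suffix_len(a, b):
--     k = 0
--     for x, y in zip(reversed(a), reversed(b)):
--         if x != y:
--             break
--         k += 1
--     return k
--
-- def find_common_suffixes(prefix_asn_paths):
--     result = {}
--     for prefix, asn_lists in prefix_asn_paths.items():
--         paths = sorted((_dedup(s.split(' ')) for s in asn_lists), key=len)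
--         cur = paths[0]
--         for lst in paths[1:]:
--             k = _common_suffix_len(cur, lst)
--             if k == 0:
--                 break
--             cur = cur[len(cur) - k:]
--         result[prefix] = cur
--     return result
-- ===== Notes on version B (the rewrite author's own statement) =====
-- stated objective: alternative
-- what changed: dedup becomes a single forward pass appending a token only when it differs from the last kept one (instead of a right-to-left while loop rebuilding the list by slicing per deletion), and the common-suffix update computes the matching-tail length once by zipping the reversed lists (instead of an index-arithmetic scan with manual break/slice); Pre_ excludes dict entries with an empty path list, on which both A and B raise IndexError.
import Mathlib
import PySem

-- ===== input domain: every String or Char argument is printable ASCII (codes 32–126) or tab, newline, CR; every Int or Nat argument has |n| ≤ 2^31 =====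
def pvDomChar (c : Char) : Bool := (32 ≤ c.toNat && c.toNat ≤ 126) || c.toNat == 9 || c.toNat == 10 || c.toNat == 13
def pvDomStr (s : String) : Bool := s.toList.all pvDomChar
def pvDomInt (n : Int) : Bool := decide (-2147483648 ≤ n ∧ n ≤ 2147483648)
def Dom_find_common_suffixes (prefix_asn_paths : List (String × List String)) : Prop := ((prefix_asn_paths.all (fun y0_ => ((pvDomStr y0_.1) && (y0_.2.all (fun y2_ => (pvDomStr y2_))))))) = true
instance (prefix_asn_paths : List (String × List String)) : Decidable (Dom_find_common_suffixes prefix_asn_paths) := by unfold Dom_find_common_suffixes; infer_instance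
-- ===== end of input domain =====

-- B replaces A's slicing right-to-left dedup by a single forward pass and the index-based
-- suffix scan by a zip of reversed lists (objective: alternative).


-- s.split(' ') — exact: Python str.split with a non-empty separator is PySem.Chars.splitOn
def pySplit (s : String) : List String := (PySem.Chars.splitOn s.toList [' ']).map String.ofList

-- ===== PORT A =====
-- the while loop of dedup: Python's i counts down; here n is the current value of i (stop at 0)
def dedupLoop : List String → Nat → List String
  | xs, 0 => xs
  | xs, n+1 =>
      let i : Int := (n : Int) + 1
      dedupLoop
        (if PySem.List.pyGet? xs i = PySem.List.pyGet? xs (i-1)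
         then PySem.List.slice xs (some 0) (some i) ++ PySem.List.slice xs (some (i+1)) none
         else xs) n

def dedup (asn_path : List String) : List String :=
  -- i = len(asn_path) - 2; while i > 0: …  (Nat subtraction: for len ≤ 2 the loop body never runs, as in Python)
  dedupLoop asn_path (asn_path.length - 2)

-- inner 'for i in range(1, cur_asn_suffix_len)' with its break
def suffixScan (cur asn_list : List String) : List Int → List String
  | [] => cur
  | i :: rest =>
      if PySem.List.pyGet? cur ((cur.length : Int) - i - 1) ≠ PySem.List.pyGet? asn_list ((asn_list.length : Int) - i - 1)
      then PySem.List.slice cur (some ((cur.length : Int) - i)) none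
      else suffixScan cur asn_list rest

-- outer 'for asn_list in asn_lists[1:]' with its break
def suffixLoop : List String → List (List String) → List String
  | cur, [] => cur
  | cur, asn_list :: rest =>
      if cur = asn_list then suffixLoop cur rest
      else if PySem.List.pyGet? cur (-1) ≠ PySem.List.pyGet? asn_list (-1) then cur  -- multi-homed: break
      else suffixLoop (suffixScan cur asn_list (PySem.List.pyRange 1 (cur.length : Int) 1)) rest

-- body of A's loop over the dict items, for one prefix's list of paths
def processA (asn_lists : List String) : List String :=
  let paths1 := asn_lists.map (fun s => dedup (pySplit s))
  -- 'asn_list != [] and set(asn_list) != ['']': a Python set never equals a list, so the second conjunct is always True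
  let paths2 := paths1.filter (fun l => decide (l ≠ []) && true)
  let paths := PySem.List.sorted paths2 (fun l => l.length) false
  let cur := (PySem.List.pyGet? paths 0).getD []   -- paths[0]; some … under Pre_
  suffixLoop cur (PySem.List.slice paths (some 1) none)

def find_common_suffixes (prefix_asn_paths : List (String × List String)) : List (String × List String) :=
  (prefix_asn_paths.foldl (fun d pa => d.insert pa.1 (processA pa.2)) PySem.Dict.empty).items

-- ===== PORT B =====
-- _dedup: single forward pass over toks[:-1], then append toks[-1]
def dedup_alt (toks : List String) : List String :=
  (toks.dropLast.foldl (fun out t => if out = [] ∨ out.getLast? ≠ some t then out ++ [t] else out) [])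
  ++ (match PySem.List.pyGet? toks (-1) with | some x => [x] | none => [])

-- _common_suffix_len's loop over zip(reversed(a), reversed(b)): k counts matching pairs up to the first mismatch
def matchLen : List (String × String) → Nat
  | [] => 0
  | p :: r => if p.1 ≠ p.2 then 0 else matchLen r + 1

def commonSuffixLen (a b : List String) : Nat := matchLen (a.reverse.zip b.reverse)

-- B's loop over paths[1:] with its break
def suffixFold : List String → List (List String) → List String
  | cur, [] => cur
  | cur, lst :: rest =>
      let k := commonSuffixLen cur lst
      if k = 0 then cur
      else suffixFold (cur.drop (cur.length - k)) rest  -- cur[len(cur)-k:] with 0 ≤ len(cur)-k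

def processB (asn_lists : List String) : List String :=
  let paths := PySem.List.sorted (asn_lists.map (fun s => dedup_alt (pySplit s))) (fun l => l.length) false
  let cur := (PySem.List.pyGet? paths 0).getD []   -- paths[0]; some … under Pre_
  suffixFold cur (PySem.List.slice paths (some 1) none)

def find_common_suffixes_alt (prefix_asn_paths : List (String × List String)) : List (String × List String) :=
  (prefix_asn_paths.foldl (fun d pa => d.insert pa.1 (processB pa.2)) PySem.Dict.empty).items

-- ===== PRECONDITION & SPEC =====
-- Pre_ excludes dict entries whose path list is empty: there Python A raises IndexError at asn_lists[0].
def Pre_find_common_suffixes (prefix_asn_paths : List (String × List String)) : Prop :=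
  ∀ pa ∈ prefix_asn_paths, pa.2 ≠ []
instance (prefix_asn_paths : List (String × List String)) : Decidable (Pre_find_common_suffixes prefix_asn_paths) := by unfold Pre_find_common_suffixes; infer_instance

def pvWitness_find_common_suffixes : (List (String × List String)) :=
  [("1.2.3.0/24", ["1 2 2 3", "5 2 3"]), ("2.0.0.0/8", ["7 7"])]

def Spec_find_common_suffixes (prefix_asn_paths : List (String × List String)) (out : List (String × List String)) : Prop := out = find_common_suffixes_alt prefix_asn_paths
instance (prefix_asn_paths : List (String × List String)) (out : List (String × List String)) : Decidable (Spec_find_common_suffixes prefix_asn_paths out) := by unfold Spec_find_common_suffixes; infer_instance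

-- ===== CLAIM (what is proved, stated in full; the proofs are below) =====
def Claim_equal_find_common_suffixes : Prop := ∀ (prefix_asn_paths : List (String × List String)), Dom_find_common_suffixes prefix_asn_paths → Pre_find_common_suffixes prefix_asn_paths → Spec_find_common_suffixes prefix_asn_paths (find_common_suffixes prefix_asn_paths)

-- ===== LEMMAS AND PROOFS =====

-- collapse-with-previous: the common specification of both dedup loops
def colp : Option String → List String → List String
  | _, [] => []
  | p, a :: t => if p = some a then colp p t else a :: colp (some a) t

theorem colp_append_last (p : Option String) (ys : List String) (b : String)
    (h : ys.getLast? = some b) : colp p (ys ++ [b]) = colp p ys := by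
  induction ys generalizing p with
  | nil => simp at h
  | cons a t ih =>
    cases t with
    | nil =>
      simp at h; subst h
      simp only [List.cons_append, List.nil_append, colp]
      split_ifs <;> simp_all [colp]
    | cons c u =>
      have h' : (c :: u).getLast? = some b := by
        rw [← h]; exact (List.getLast?_cons_cons ..).symm
      have key : colp (some c) (u ++ [b]) = colp (some c) u := by
        have hc := ih (some c) h'
        simp only [List.cons_append, colp, reduceIte] at hc
        exact hc
      simp only [List.cons_append, colp]
      split_ifs <;> simp_all

theorem colp_append_ne (p : Option String) (ys : List String) (c b : String)
    (h : ys.getLast? = some c) (hne : c ≠ b) : colp p (ys ++ [b]) = colp p ys ++ [b] := by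
  induction ys generalizing p with
  | nil => simp at h
  | cons a t ih =>
    cases t with
    | nil =>
      simp at h; subst h
      simp only [List.cons_append, List.nil_append, colp]
      have hab : (some a : Option String) ≠ some b := by simpa using hne
      split_ifs <;> simp_all [colp]
    | cons d u =>
      have h' : (d :: u).getLast? = some c := by
        rw [← h]; exact (List.getLast?_cons_cons ..).symm
      have key : colp (some d) (u ++ [b]) = colp (some d) u ++ [b] := by
        have hc := ih (some d) h'
        simp only [List.cons_append, colp, reduceIte] at hc
        exact hc
      simp only [List.cons_append, colp]
      split_ifs <;> simp_all

theorem foldl_colp (ys : List String) : ∀ acc : List String,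
    ys.foldl (fun out t => if out = [] ∨ out.getLast? ≠ some t then out ++ [t] else out) acc
      = acc ++ colp acc.getLast? ys := by
  induction ys with
  | nil => intro acc; simp [colp]
  | cons t ys ih =>
    intro acc
    rw [List.foldl_cons, ih]
    by_cases h : acc.getLast? = some t
    · have hne : acc ≠ [] := by rintro rfl; simp at h
      rw [if_neg (by simp [h, hne]), h]
      simp [colp]
    · rw [if_pos (by tauto)]
      rw [show (acc ++ [t]).getLast? = some t by simp]
      have e : colp acc.getLast? (t :: ys) = t :: colp (some t) ys := by
        rw [colp, if_neg h]
      rw [e]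
      simp

theorem dedupLoop_eq (n : Nat) : ∀ xs : List String, n + 2 ≤ xs.length →
    dedupLoop xs n = colp none (xs.take (n+1)) ++ xs.drop (n+1) := by
  induction n with
  | zero =>
    intro xs hlen
    match xs with
    | x :: t => simp [dedupLoop, colp]
  | succ n ih =>
    intro xs hlen
    have h1 : n + 1 < xs.length := by omega
    have h2 : n < xs.length := by omega
    rw [dedupLoop]
    have e1 : PySem.List.pyGet? xs ((n : Int) + 1) = some xs[n+1] := by
      rw [show ((n : Int) + 1) = ((n+1 : Nat) : Int) by push_cast; ring]
      rw [PySem.List.pyGet?_natCast, List.getElem?_eq_getElem h1]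
    have e2 : PySem.List.pyGet? xs ((n : Int) + 1 - 1) = some xs[n] := by
      rw [show ((n : Int) + 1 - 1) = ((n : Nat) : Int) by ring]
      rw [PySem.List.pyGet?_natCast, List.getElem?_eq_getElem h2]
    have etake : xs.take (n+2) = xs.take (n+1) ++ [xs[n+1]] := by
      rw [List.take_add_one, List.getElem?_eq_getElem h1]; rfl
    have hlast : (xs.take (n+1)).getLast? = some xs[n] := by
      have hlt : (xs.take (n+1)).length = n + 1 := by simp; omega
      rw [List.getLast?_eq_getElem?, hlt]
      simp [h2]
    simp only [e1, e2]
    by_cases heq : xs[n+1] = xs[n]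
    · rw [if_pos (by rw [heq])]
      have es1 : PySem.List.slice xs (some 0) (some ((n:Int)+1)) = xs.take (n+1) := by
        rw [PySem.List.slice_zero_start, show ((n : Int) + 1) = ((n+1 : Nat) : Int) by push_cast; ring,
            PySem.List.slice_to_natCast]
      have es2 : PySem.List.slice xs (some ((n:Int)+1+1)) none = xs.drop (n+2) := by
        rw [show ((n : Int) + 1 + 1) = ((n+2 : Nat) : Int) by push_cast; ring,
            PySem.List.slice_from_natCast]
      rw [es1, es2]
      have hlen' : n + 2 ≤ (xs.take (n+1) ++ xs.drop (n+2)).length := by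
        simp; omega
      rw [ih _ hlen']
      have ht : (xs.take (n+1) ++ xs.drop (n+2)).take (n+1) = xs.take (n+1) := by
        rw [List.take_append_of_le_length (by simp; omega), List.take_take]
        simp
      have hd : (xs.take (n+1) ++ xs.drop (n+2)).drop (n+1) = xs.drop (n+2) := by
        rw [List.drop_append_of_le_length (by simp; omega)]
        simp
      rw [ht, hd, etake, colp_append_last none _ _ (by rw [hlast, heq])]
    · rw [if_neg (by simpa using heq)]
      rw [ih _ (by omega)]
      rw [etake, colp_append_ne none _ xs[n] xs[n+1] hlast (fun h => heq h.symm)]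
      have : xs.drop (n+1) = xs[n+1] :: xs.drop (n+2) := List.drop_eq_getElem_cons h1
      rw [this]
      simp

theorem drop_length_sub_one_eq (l : List String) (h : l ≠ []) :
    l.drop (l.length - 1) = [l.getLast h] := by
  rw [List.getLast_eq_getElem]
  have h1 : l.length - 1 < l.length := by
    cases l with | nil => simp at h | cons a t => simp
  rw [List.drop_eq_getElem_cons h1]
  congr 1
  rw [show l.length - 1 + 1 = l.length by omega, List.drop_length]

theorem dedup_eq_alt (xs : List String) : dedup xs = dedup_alt xs := by
  match xs with
  | [] => rfl
  | [a] =>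
    simp [dedup, dedupLoop, dedup_alt, PySem.List.pyGet?_neg_one]
  | [a, b] =>
    simp [dedup, dedupLoop, dedup_alt, PySem.List.pyGet?_neg_one]
  | a :: b :: c :: t =>
    have hne : (a :: b :: c :: t : List String) ≠ [] := by simp
    set l := a :: b :: c :: t with hl
    have hlen : 3 ≤ l.length := by simp [hl]
    have hsub : l.length - 2 + 2 ≤ l.length := by omega
    have hloop := dedupLoop_eq (l.length - 2) l hsub
    have hn1 : l.length - 2 + 1 = l.length - 1 := by omega
    rw [dedup, hloop, hn1]
    rw [dedup_alt, foldl_colp, List.nil_append]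
    rw [PySem.List.pyGet?_neg_one, List.getLast?_eq_some_getLast hne]
    rw [drop_length_sub_one_eq l hne, ← List.dropLast_eq_take]
    rfl

theorem dedup_alt_ne_nil (xs : List String) (h : xs ≠ []) : dedup_alt xs ≠ [] := by
  rw [dedup_alt, PySem.List.pyGet?_neg_one, List.getLast?_eq_some_getLast h]
  simp

-- Python str.split with a non-empty separator always returns at least one piece
theorem splitOn_go_ne (sep : List Char) (fuel : Nat) : ∀ (l cur : List Char) (acc : List (List Char)),
    PySem.Chars.splitOn.go sep fuel l cur acc ≠ [] := by
  induction fuel with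
  | zero => intro l cur acc; simp [PySem.Chars.splitOn.go]
  | succ n ih =>
    intro l cur acc
    cases l with
    | nil => simp [PySem.Chars.splitOn.go]
    | cons c rest =>
      rw [PySem.Chars.splitOn.go]
      split
      · exact ih _ _ _
      · exact ih _ _ _

theorem pySplit_ne_nil (s : String) : pySplit s ≠ [] := by
  unfold pySplit PySem.Chars.splitOn
  intro h
  exact splitOn_go_ne _ _ _ _ _ (List.map_eq_nil_iff.mp h)

theorem pyRange_one_nil (a b : Int) (h : b ≤ a) : PySem.List.pyRange a b 1 = [] := by
  simp [PySem.List.pyRange]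
  omega

theorem matchLen_le (zs : List (String × String)) : matchLen zs ≤ zs.length := by
  induction zs with
  | nil => simp [matchLen]
  | cons p r ih => rw [matchLen]; split_ifs <;> simp; omega

theorem matchLen_before (zs : List (String × String)) : ∀ j, j < matchLen zs →
    ∀ (hj : j < zs.length), (zs[j]'hj).1 = (zs[j]'hj).2 := by
  induction zs with
  | nil => intro j h; simp [matchLen] at h
  | cons p r ih =>
    intro j hj hlen
    rw [matchLen] at hj
    split_ifs at hj with hp
    · omega
    · cases j with
      | zero => simpa using not_ne_iff.mp hp
      | succ j =>
        rw [List.getElem_cons_succ]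
        exact ih j (by omega) (by simpa using hlen)

theorem matchLen_mismatch (zs : List (String × String)) (h : matchLen zs < zs.length) :
    (zs[matchLen zs]'h).1 ≠ (zs[matchLen zs]'h).2 := by
  induction zs with
  | nil => simp at h
  | cons p r ih =>
    by_cases hp : p.1 ≠ p.2
    · have h0 : matchLen (p :: r) = 0 := by rw [matchLen, if_pos hp]
      simp only [h0, List.getElem_cons_zero]
      exact hp
    · have h1 : matchLen (p :: r) = matchLen r + 1 := by rw [matchLen, if_neg hp]
      have h2 : matchLen r < r.length := by
        have := h; rw [h1] at this; simpa using this
      have := ih h2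
      simp only [h1, List.getElem_cons_succ]
      exact this

theorem matchLen_zip_self (xs : List String) : matchLen (xs.zip xs) = xs.length := by
  induction xs with
  | nil => simp [matchLen]
  | cons x t ih => simp [List.zip_cons_cons, matchLen, ih]

-- the j-th pair of zip(reversed(cur), reversed(lst))
theorem zs_getElem (cur lst : List String) (hlen : cur.length ≤ lst.length) (j : Nat) (hj : j < cur.length) :
    (cur.reverse.zip lst.reverse)[j]'(by simp; omega)
      = (cur[cur.length-1-j]'(by omega), lst[lst.length-1-j]'(by omega)) := by
  rw [List.getElem_zip]
  congr 1 <;> rw [List.getElem_reverse]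

theorem commonSuffixLen_le (cur lst : List String) (hlen : cur.length ≤ lst.length) :
    commonSuffixLen cur lst ≤ cur.length := by
  have h := matchLen_le (cur.reverse.zip lst.reverse)
  have hz : (cur.reverse.zip lst.reverse).length = cur.length := by simp; omega
  rw [hz] at h
  exact h

theorem csl_before (cur lst : List String) (hlen : cur.length ≤ lst.length) (j : Nat)
    (hj : j < commonSuffixLen cur lst) (hjl : j < cur.length) :
    cur[cur.length-1-j]'(by omega) = lst[lst.length-1-j]'(by omega) := by
  have hz : (cur.reverse.zip lst.reverse).length = cur.length := by simp; omega
  have h := matchLen_before (cur.reverse.zip lst.reverse) j hj (by omega)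
  rwa [zs_getElem cur lst hlen j hjl] at h

theorem csl_mismatch (cur lst : List String) (hlen : cur.length ≤ lst.length)
    (h : commonSuffixLen cur lst < cur.length) :
    cur[cur.length-1-commonSuffixLen cur lst]'(by omega) ≠ lst[lst.length-1-commonSuffixLen cur lst]'(by omega) := by
  have hz : (cur.reverse.zip lst.reverse).length = cur.length := by simp; omega
  have hk : matchLen (cur.reverse.zip lst.reverse) < (cur.reverse.zip lst.reverse).length := by
    rw [hz]; exact h
  have hmm := matchLen_mismatch (cur.reverse.zip lst.reverse) hk
  rw [zs_getElem cur lst hlen (matchLen (cur.reverse.zip lst.reverse)) (by rw [hz] at hk; exact hk)] at hmm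
  exact hmm

theorem suffixScan_eq (cur lst : List String) (hlen : cur.length ≤ lst.length) :
    ∀ (n m : Nat), cur.length - m = n → 1 ≤ m → m ≤ commonSuffixLen cur lst →
    suffixScan cur lst (PySem.List.pyRange (m : Int) (cur.length : Int) 1)
      = cur.drop (cur.length - commonSuffixLen cur lst) := by
  have hkle := commonSuffixLen_le cur lst hlen
  have hzlen : (cur.reverse.zip lst.reverse).length = cur.length := by simp; omega
  intro n
  induction n with
  | zero =>
    intro m hm h1 h2
    rw [pyRange_one_nil _ _ (by omega)]
    have hke : commonSuffixLen cur lst = cur.length := by omega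
    rw [hke]
    simp [suffixScan]
  | succ n ih =>
    intro m hm h1 h2
    have hmlt : m < cur.length := by omega
    rw [PySem.List.pyRange_one_cons (by exact_mod_cast hmlt)]
    rw [suffixScan]
    have ec : PySem.List.pyGet? cur ((cur.length : Int) - (m : Int) - 1)
        = some (cur[cur.length-1-m]'(by omega)) := by
      rw [show ((cur.length : Int) - (m : Int) - 1) = ((cur.length - 1 - m : Nat) : Int) by omega]
      rw [PySem.List.pyGet?_natCast, List.getElem?_eq_getElem (by omega)]
    have el : PySem.List.pyGet? lst ((lst.length : Int) - (m : Int) - 1)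
        = some (lst[lst.length-1-m]'(by omega)) := by
      rw [show ((lst.length : Int) - (m : Int) - 1) = ((lst.length - 1 - m : Nat) : Int) by omega]
      rw [PySem.List.pyGet?_natCast, List.getElem?_eq_getElem (by omega)]
    rw [ec, el]
    by_cases hcase : m < commonSuffixLen cur lst
    · have heq : cur[cur.length-1-m]'(by omega) = lst[lst.length-1-m]'(by omega) := by
        have := matchLen_before (cur.reverse.zip lst.reverse) m hcase (by omega)
        rwa [zs_getElem cur lst hlen m hmlt] at this
      rw [if_neg (by simp [heq])]
      have := ih (m+1) (by omega) (by omega) (by omega)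
      rw [show ((m : Int) + 1) = ((m + 1 : Nat) : Int) by omega]
      exact this
    · have hmk : m = commonSuffixLen cur lst := by omega
      have hne' := csl_mismatch cur lst hlen (by omega)
      simp only [← hmk] at hne'
      rw [if_pos (by simpa using hne')]
      rw [show ((cur.length : Int) - (m : Int)) = ((cur.length - m : Nat) : Int) by omega]
      rw [PySem.List.slice_from_natCast, hmk]

theorem loop_eq : ∀ (rest : List (List String)) (cur : List String), cur ≠ [] →
    (∀ l ∈ rest, l ≠ [] ∧ cur.length ≤ l.length) →
    suffixLoop cur rest = suffixFold cur rest := by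
  intro rest
  induction rest with
  | nil => intro cur _ _; rfl
  | cons lst rest' ih =>
    intro cur hc hinv
    obtain ⟨hl, hlen⟩ := hinv lst (by simp)
    have hcur0 : 0 < cur.length := List.length_pos_iff.mpr hc
    have hlst0 : 0 < lst.length := List.length_pos_iff.mpr hl
    have hzlen : (cur.reverse.zip lst.reverse).length = cur.length := by simp; omega
    have hkle := commonSuffixLen_le cur lst hlen
    simp only [suffixLoop, suffixFold]
    by_cases hecl : cur = lst
    · subst hecl
      rw [if_pos rfl]
      have hk : commonSuffixLen cur cur = cur.length := by
        have := matchLen_zip_self cur.reverse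
        simpa [commonSuffixLen] using this
      rw [if_neg (by omega), hk]
      simp only [Nat.sub_self, List.drop_zero]
      exact ih cur hc (fun l hl' => hinv l (by simp [hl']))
    · rw [if_neg hecl]
      have hgc : PySem.List.pyGet? cur (-1) = some (cur.getLast hc) := by
        rw [PySem.List.pyGet?_neg_one, List.getLast?_eq_some_getLast]
      have hgl : PySem.List.pyGet? lst (-1) = some (lst.getLast hl) := by
        rw [PySem.List.pyGet?_neg_one, List.getLast?_eq_some_getLast]
      have hz0 := zs_getElem cur lst hlen 0 hcur0
      have hglast : cur.getLast hc = cur[cur.length-1]'(by omega) := List.getLast_eq_getElem hc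
      have hllast : lst.getLast hl = lst[lst.length-1]'(by omega) := List.getLast_eq_getElem hl
      by_cases hlast : cur.getLast hc = lst.getLast hl
      · -- shared last AS: k ≥ 1, A scans, B drops
        have hk1 : 1 ≤ commonSuffixLen cur lst := by
          by_contra h0
          have hk0 : commonSuffixLen cur lst = 0 := by omega
          have hmm := csl_mismatch cur lst hlen (by omega)
          simp only [hk0] at hmm
          exact hmm (by simp only [Nat.sub_zero]; rw [← hglast, ← hllast, hlast])
        rw [if_neg (by rw [hgc, hgl]; simp [hlast])]
        rw [if_neg (by omega)]
        have hscan := suffixScan_eq cur lst hlen (cur.length - 1) 1 rfl le_rfl hk1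
        norm_num at hscan
        rw [hscan]
        apply ih
        · intro hdnil
          have : (cur.drop (cur.length - commonSuffixLen cur lst)).length = 0 := by rw [hdnil]; rfl
          rw [List.length_drop] at this
          omega
        · intro l hl'
          obtain ⟨hln, hll⟩ := hinv l (by simp [hl'])
          refine ⟨hln, ?_⟩
          rw [List.length_drop]
          omega
      · -- multi-homed: both break
        have hk0 : commonSuffixLen cur lst = 0 := by
          by_contra h0
          have hb := csl_before cur lst hlen 0 (by omega) (by omega)
          exact hlast (by rw [hglast, hllast]; simpa using hb)
        rw [if_pos (by rw [hgc, hgl]; simp; intro he; exact hlast he)]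
        rw [if_pos hk0]

theorem processA_eq_processB (ls : List String) (h : ls ≠ []) : processA ls = processB ls := by
  simp only [processA, processB]
  have hmap : ls.map (fun s => dedup (pySplit s)) = ls.map (fun s => dedup_alt (pySplit s)) :=
    List.map_congr_left (fun s _ => dedup_eq_alt (pySplit s))
  have hfil : (ls.map (fun s => dedup_alt (pySplit s))).filter (fun l => decide (l ≠ []) && true)
      = ls.map (fun s => dedup_alt (pySplit s)) := by
    apply List.filter_eq_self.mpr
    intro a ha
    obtain ⟨s, _, rfl⟩ := List.mem_map.mp ha
    simp [dedup_alt_ne_nil _ (pySplit_ne_nil s)]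
  rw [hmap, hfil]
  cases hp : PySem.List.sorted (ls.map (fun s => dedup_alt (pySplit s))) (fun l => l.length) false with
  | nil =>
    exfalso
    rw [PySem.List.sorted_eq_nil_iff] at hp
    exact h (List.map_eq_nil_iff.mp hp)
  | cons m t =>
    rw [PySem.List.pyGet?_zero_cons, Option.getD_some, PySem.List.slice_from_one, List.tail_cons]
    have hmem : ∀ x, x ∈ m :: t → x ≠ ([] : List String) := by
      intro x hx
      have hx' : x ∈ PySem.List.sorted (ls.map (fun s => dedup_alt (pySplit s))) (fun l => l.length) false := by
        rw [hp]; exact hx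
      rw [PySem.List.mem_sorted] at hx'
      obtain ⟨s, _, rfl⟩ := List.mem_map.mp hx'
      exact dedup_alt_ne_nil _ (pySplit_ne_nil s)
    have hle := PySem.List.key_head_sorted_le (ls.map (fun s => dedup_alt (pySplit s))) (fun l => l.length) hp
    apply loop_eq t m (hmem m (by simp))
    intro l hl'
    refine ⟨hmem l (by simp [hl']), ?_⟩
    have hl2 : l ∈ PySem.List.sorted (ls.map (fun s => dedup_alt (pySplit s))) (fun l => l.length) false := by
      rw [hp]; exact List.mem_cons_of_mem m hl'
    rw [PySem.List.mem_sorted] at hl2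
    exact hle l hl2

theorem fold_eq (pap : List (String × List String)) :
    ∀ (d : PySem.Dict String (List String)),
      (∀ pa ∈ pap, pa.2 ≠ ([] : List String)) →
      pap.foldl (fun d pa => d.insert pa.1 (processA pa.2)) d
        = pap.foldl (fun d pa => d.insert pa.1 (processB pa.2)) d := by
  induction pap with
  | nil => intro d _; rfl
  | cons pa rest ih =>
      intro d hp
      simp only [List.foldl_cons]
      rw [processA_eq_processB pa.2 (hp pa (by simp))]
      exact ih (d.insert pa.1 (processB pa.2)) (fun q hq => hp q (by simp [hq]))

-- ===== VERDICT (by name: the statement is the Claim_ definition above) =====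
theorem find_common_suffixes_spec : Claim_equal_find_common_suffixes := by
  intro pap _ hpre
  unfold Spec_find_common_suffixes find_common_suffixes find_common_suffixes_alt
  rw [fold_eq pap PySem.Dict.empty hpre]
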